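-- pv_equiv track=rewrite | github.com/ktg314/google-foobar | lv3/part2/baby_solution.py | helper
-- ===== SOURCE A (Python) =====
-- import math
--
-- IMPOSSIBLE = -42
--
-- def helper(mach, facula):
--     # Covers (1, n) and (m, 1) and (1,1) = 0
--     if mach == 1:
--         return facula - 1
--     if facula == 1:
--         return mach - 1
--     # Fail Case 1
--     if mach == facula:
--         return IMPOSSIBLE
--     if mach > facula:
--         big = mach
--         small = facula
--     else:
--         big = facula
--         small = mach
--
--     if big % small == 0:
--         return IMPOSSIBLE
--     generation = int(math.floor(big / small))
--     big -= generation * small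
--     big = int(big)
--     help = helper(big, small)
--     if help == IMPOSSIBLE:
--         return help
--     else:
--         return generation + help
-- ===== SOURCE B (Python) =====
-- IMPOSSIBLE = -42
--
-- def helper(mach, facula):
--     total = 0
--     while mach != 1 and facula != 1:
--         if mach == facula:
--             return IMPOSSIBLE
--         big, small = (mach, facula) if mach > facula else (facula, mach)
--         q, r = divmod(big, small)
--         if r == 0:
--             return IMPOSSIBLE
--         total += q
--         mach, facula = r, small
--     return total + (facula if mach == 1 else mach) - 1
-- ===== Notes on version B (the rewrite author's own statement) =====
-- stated objective: simpler
-- what changed: The recursion with unwinding 'generation + help' returns is replaced by a single while-loop threading an accumulator, with the two base cases merged into the loop condition and divmod replacing the float-based floor division; Pre_ admits positive counts plus every corner where A still returns (base/equality cases and first-step divisibility), excluding only inputs where A divides by zero or recurses forever.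
import Mathlib
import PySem

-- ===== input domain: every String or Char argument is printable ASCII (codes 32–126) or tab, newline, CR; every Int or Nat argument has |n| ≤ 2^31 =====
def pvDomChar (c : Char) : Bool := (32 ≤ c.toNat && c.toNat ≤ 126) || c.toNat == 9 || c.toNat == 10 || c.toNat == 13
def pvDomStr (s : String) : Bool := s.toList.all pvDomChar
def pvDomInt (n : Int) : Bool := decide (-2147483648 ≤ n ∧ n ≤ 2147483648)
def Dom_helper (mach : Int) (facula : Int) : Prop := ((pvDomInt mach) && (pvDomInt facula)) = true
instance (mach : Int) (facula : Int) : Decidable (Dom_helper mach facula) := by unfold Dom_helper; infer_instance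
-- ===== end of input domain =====

-- B replaces A's recursion (unwinding 'generation + help') by one while-loop with an accumulator.

-- ===== PORT A =====
-- Python's recursion does not terminate on nonpositive inputs, so the port carries a fuel
-- parameter; the top level supplies fuel that lemma key shows sufficient on all of Pre_.
-- 'int(math.floor(big / small))' is ported as floordiv: exact for |values| ≤ 2^31 (double
-- precision floor(big/small) = big // small there).
def helperFuel : Nat → Int → Int → Int
  | 0, _, _ => -42
  | f + 1, mach, facula =>
    if mach = 1 then facula - 1
    else if facula = 1 then mach - 1
    else if mach = facula then -42
    else
      let big := if mach > facula then mach else facula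
      let small := if mach > facula then facula else mach
      if PySem.Int.mod big small = 0 then -42
      else
        let generation := PySem.Int.floordiv big small
        let big' := big - generation * small
        let help := helperFuel f big' small
        if help = -42 then help else generation + help

def helper (mach : Int) (facula : Int) : Int :=
  helperFuel (mach.toNat + facula.toNat + 1) mach facula

-- ===== PORT B =====
-- fuel for the 'while True' loop, sufficient on Pre_ (same top-level fuel as A's port).
def helperAltFuel : Nat → Int → Int → Int → Int
  | 0, _, _, _ => -42
  | f + 1, total, mach, facula =>
    if mach ≠ 1 ∧ facula ≠ 1 then
      if mach = facula then -42
      else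
        let big := if mach > facula then mach else facula
        let small := if mach > facula then facula else mach
        let q := PySem.Int.floordiv big small
        let r := PySem.Int.mod big small
        if r = 0 then -42
        else helperAltFuel f (total + q) r small
    else total + (if mach = 1 then facula else mach) - 1

def helper_alt (mach : Int) (facula : Int) : Int :=
  helperAltFuel (mach.toNat + facula.toNat + 1) 0 mach facula

-- ===== PRECONDITION & SPEC =====
-- Pre_ admits positive counts (the puzzle's domain) plus every corner on which A still returns:
-- the base/equality cases and the first-step divisibility cases; on the remaining inputs A
-- divides by zero or recurses forever.
def Pre_helper (mach : Int) (facula : Int) : Prop :=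
  (1 ≤ mach ∧ 1 ≤ facula) ∨ mach = 1 ∨ facula = 1 ∨ mach = facula ∨
    (mach ≠ 0 ∧ facula ≠ 0 ∧ PySem.Int.mod (max mach facula) (min mach facula) = 0)
instance (mach : Int) (facula : Int) : Decidable (Pre_helper mach facula) := by unfold Pre_helper; infer_instance
def pvWitness_helper : Int × Int := (4, 7)
def Spec_helper (mach : Int) (facula : Int) (out : Int) : Prop := out = helper_alt mach facula
instance (mach : Int) (facula : Int) (out : Int) : Decidable (Spec_helper mach facula out) := by unfold Spec_helper; infer_instance

-- ===== CLAIM (what is proved, stated in full; the proofs are below) =====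
def Claim_equal_helper : Prop := ∀ (mach : Int) (facula : Int), Dom_helper mach facula → Pre_helper mach facula → Spec_helper mach facula (helper mach facula)

-- ===== LEMMAS AND PROOFS =====

-- A's result on positive inputs is either the sentinel -42 or a nonnegative count.
theorem helperFuel_cases (f : Nat) : ∀ (m n : Int), 1 ≤ m → 1 ≤ n →
    helperFuel f m n = -42 ∨ 0 ≤ helperFuel f m n := by
  induction f with
  | zero => intro m n _ _; left; rfl
  | succ f ih =>
    intro m n hm hn
    simp only [helperFuel]
    by_cases h1 : m = 1
    · simp [h1]; omega
    · by_cases h2 : n = 1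
      · simp [h1, h2]; omega
      · by_cases h3 : m = n
        · simp [h2, h3]
        · simp only [h1, h2, h3, if_false]
          set big := if m > n then m else n with hbig
          set small := if m > n then n else m with hsmall
          have hs1 : 1 ≤ small := by simp only [hsmall]; split <;> omega
          by_cases h4 : PySem.Int.mod big small = 0
          · simp [h4]
          · simp only [h4, if_false]
            have hr : 1 ≤ big - PySem.Int.floordiv big small * small := by
              have h0 := PySem.Int.floordiv_mul_add_mod big small
              have hmod := PySem.Int.mod_eq_emod_of_pos (a := big) (b := small) (by omega)
              have := Int.emod_nonneg big (b := small) (by omega)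
              omega
            have hq : 0 ≤ PySem.Int.floordiv big small := by
              rw [PySem.Int.floordiv_eq_ediv_of_pos (a := big) (b := small) (by omega)]
              apply Int.ediv_nonneg <;> [skip; omega]
              simp only [hbig]; split <;> omega
            rcases ih (big - PySem.Int.floordiv big small * small) small hr hs1 with h | h
            · simp [h]
            · have : helperFuel f (big - PySem.Int.floordiv big small * small) small ≠ -42 := by omega
              simp only [this, if_false]
              omega

-- Loop/recursion correspondence: with positive arguments and sufficient fuel, B's loop with
-- accumulator `total` returns the sentinel exactly when A's recursion does, and otherwise
-- total + A's value.
theorem key (f : Nat) : ∀ (m n : Int), 1 ≤ m → 1 ≤ n → m.toNat + n.toNat ≤ f →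
    ∀ (total : Int), helperAltFuel f total m n =
      (if helperFuel f m n = -42 then -42 else total + helperFuel f m n) := by
  induction f with
  | zero => intro m n hm hn hf total; omega
  | succ f ih =>
    intro m n hm hn hf total
    simp only [helperFuel, helperAltFuel]
    by_cases h1 : m = 1
    · have hne : n - 1 ≠ -42 := by omega
      simp [h1, hne]
      omega
    · by_cases h2 : n = 1
      · have hne : m - 1 ≠ -42 := by omega
        simp [h1, h2, hne]
        omega
      · by_cases h3 : m = n
        · simp [h2, h3]
        · simp only [h1, h2, h3, if_false, ne_eq, not_false_eq_true, and_self, if_true]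
          set big := if m > n then m else n with hbig
          set small := if m > n then n else m with hsmall
          have hbs : small < big := by
            simp only [hbig, hsmall]; split <;> omega
          have hs1 : 1 ≤ small := by simp only [hsmall]; split <;> omega
          by_cases h4 : PySem.Int.mod big small = 0
          · simp [h4]
          · simp only [h4, if_false]
            have hmodemod := PySem.Int.mod_eq_emod_of_pos (a := big) (b := small) (by omega)
            have hmnn := Int.emod_nonneg big (b := small) (by omega)
            have hmlt := Int.emod_lt_of_pos big (b := small) (by omega)
            have h0 := PySem.Int.floordiv_mul_add_mod big small
            have hr : 1 ≤ big - PySem.Int.floordiv big small * small := by omega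
            have hq : 1 ≤ PySem.Int.floordiv big small := by
              rw [PySem.Int.floordiv_eq_ediv_of_pos (a := big) (b := small) (by omega)]
              exact (Int.le_ediv_iff_mul_le (by omega)).mpr (by omega)
            have hfuel : (big - PySem.Int.floordiv big small * small).toNat + small.toNat ≤ f := by
              have hsum : big + small ≤ m + n := by
                simp only [hbig, hsmall]; split <;> omega
              omega
            have hrw : PySem.Int.mod big small = big - PySem.Int.floordiv big small * small := by omega
            rw [hrw, ih (big - PySem.Int.floordiv big small * small) small hr hs1 hfuel (total + PySem.Int.floordiv big small)]
            rcases helperFuel_cases f (big - PySem.Int.floordiv big small * small) small hr hs1 with h | h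
            · simp [h]
            · have hne : helperFuel f (big - PySem.Int.floordiv big small * small) small ≠ -42 := by omega
              have hne2 : PySem.Int.floordiv big small + helperFuel f (big - PySem.Int.floordiv big small * small) small ≠ -42 := by omega
              simp only [hne, hne2, if_false]
              ring

-- On the base/equality corners both programs decide within the first step, for any fuel.
theorem base_eq (f : Nat) (m n : Int) (h : m = 1 ∨ n = 1 ∨ m = n) :
    helperAltFuel (f + 1) 0 m n = helperFuel (f + 1) m n := by
  by_cases h1 : m = 1
  · simp [helperFuel, helperAltFuel, h1]
  · by_cases h2 : n = 1
    · simp [helperFuel, helperAltFuel, h1, h2]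
    · have h3 : m = n := by tauto
      simp [helperFuel, helperAltFuel, h2, h3]

-- On the first-step divisibility corners both programs return the sentinel, for any fuel.
theorem div_corner_eq (f : Nat) (m n : Int) (h1 : m ≠ 1) (h2 : n ≠ 1) (h3 : m ≠ n)
    (hmod : PySem.Int.mod (max m n) (min m n) = 0) :
    helperAltFuel (f + 1) 0 m n = helperFuel (f + 1) m n := by
  have hmax : (if m > n then m else n) = max m n := by split <;> omega
  have hmin : (if m > n then n else m) = min m n := by split <;> omega
  simp [helperFuel, helperAltFuel, h1, h2, h3, hmax, hmin, hmod]

-- ===== VERDICT (by name: the statement is the Claim_ definition above) =====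
theorem helper_spec : Claim_equal_helper := by
  intro mach facula _ hpre
  rcases hpre with ⟨hm, hn⟩ | h | h | h | ⟨_, _, hmod⟩
  case inr.inl => exact (base_eq (mach.toNat + facula.toNat) mach facula (Or.inl h)).symm
  case inr.inr.inl => exact (base_eq (mach.toNat + facula.toNat) mach facula (Or.inr (Or.inl h))).symm
  case inr.inr.inr.inl => exact (base_eq (mach.toNat + facula.toNat) mach facula (Or.inr (Or.inr h))).symm
  case inr.inr.inr.inr =>
    by_cases h1 : mach = 1
    · exact (base_eq (mach.toNat + facula.toNat) mach facula (Or.inl h1)).symm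
    · by_cases h2 : facula = 1
      · exact (base_eq (mach.toNat + facula.toNat) mach facula (Or.inr (Or.inl h2))).symm
      · by_cases h3 : mach = facula
        · exact (base_eq (mach.toNat + facula.toNat) mach facula (Or.inr (Or.inr h3))).symm
        · exact (div_corner_eq (mach.toNat + facula.toNat) mach facula h1 h2 h3 hmod).symm
  unfold Spec_helper helper helper_alt
  rw [key (mach.toNat + facula.toNat + 1) mach facula hm hn (by omega) 0]
  rcases helperFuel_cases (mach.toNat + facula.toNat + 1) mach facula hm hn with h | h
  · simp [h]
  · have : helperFuel (mach.toNat + facula.toNat + 1) mach facula ≠ -42 := by omega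
    simp [this]
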